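-- pv_equiv track=rewrite | github.com/byeongmin-kwak/Baekjoon-Programmers | 프로그래머스/2/17683. ［3차］ 방금그곡/［3차］ 방금그곡.py | solution
-- ===== SOURCE A (Python) =====
-- def solution(m, musicinfos):
--     # 1. # 처리된 음을 소문자로 변환
--     def convert(melody):
--         return melody.replace("C#", "c").replace("D#", "d") \
--                      .replace("F#", "f").replace("G#", "g") \
--                      .replace("A#", "a").replace("B#", "b")
--
--     m = convert(m)  # 듣고 싶은 멜로디 변환
--
--     answer = []
--     for idx, info in enumerate(musicinfos):
--         start, end, title, melody = info.split(",")
--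
--         # 2. 시간 계산 (분 단위)
--         sh, sm = map(int, start.split(":"))
--         eh, em = map(int, end.split(":"))
--         play_time = (eh * 60 + em) - (sh * 60 + sm)
--
--         # 3. 멜로디 변환
--         melody = convert(melody)
--
--         # 4. 실제 재생 멜로디 생성
--         played = (melody * (play_time // len(melody) + 1))[:play_time]
--
--         # 5. 멜로디 포함 여부 확인
--         if m in played:
--             answer.append((play_time, idx, title))
--
--     # 6. 조건에 따라 정렬
--     if not answer:
--         return "(None)"
--     answer.sort(key=lambda x: (-x[0], x[1]))
--     return answer[0][2]
-- ===== SOURCE B (Python) =====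
-- def solution(m, musicinfos):
--     def convert(s):
--         return s.replace("C#", "c").replace("D#", "d") \
--                 .replace("F#", "f").replace("G#", "g") \
--                 .replace("A#", "a").replace("B#", "b")
--
--     def minutes(clock):
--         h, mm = clock.split(":")
--         return int(h) * 60 + int(mm)
--
--     target = convert(m)
--     best = None  # (play_time, title) of the current winner
--     for info in musicinfos:
--         start, end, title, tune = info.split(",")
--         t = minutes(end) - minutes(start)
--         tune = convert(tune)
--         # build the played melody one note at a time, cycling through the tune
--         played = "".join(tune[i % len(tune)] for i in range(t))
--         # strict > keeps the earliest match on equal play times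
--         if target in played and (best is None or t > best[0]):
--             best = (t, title)
--     return "(None)" if best is None else best[1]
-- ===== Notes on version B (the rewrite author's own statement) =====
-- stated objective: alternative
-- what changed: Replaces A's append-to-list / sort-by-(-play_time, idx) / take-head selection with a single-pass running maximum under strict '>' (earliest index wins ties), and builds the played melody note-by-note by cyclic modular indexing (tune[i % len(tune)] for i in range(t)) instead of A's repeat-the-string-then-slice construction.
import Mathlib
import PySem

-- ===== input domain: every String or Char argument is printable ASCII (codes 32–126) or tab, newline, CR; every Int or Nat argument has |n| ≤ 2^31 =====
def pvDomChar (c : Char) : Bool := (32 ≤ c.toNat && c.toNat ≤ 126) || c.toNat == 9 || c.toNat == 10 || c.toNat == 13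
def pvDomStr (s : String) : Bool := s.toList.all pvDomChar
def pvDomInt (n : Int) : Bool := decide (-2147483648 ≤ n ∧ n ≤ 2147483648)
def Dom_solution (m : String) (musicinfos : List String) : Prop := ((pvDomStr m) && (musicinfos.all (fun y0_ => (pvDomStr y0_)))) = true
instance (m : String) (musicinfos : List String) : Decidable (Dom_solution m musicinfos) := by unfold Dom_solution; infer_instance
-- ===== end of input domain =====

-- B replaces A's append-to-list / sort-by-(-time,idx) / take-head selection by a single-pass
-- running maximum with strict '>', and builds the played melody by cyclic modular indexing
-- instead of A's repeat-then-slice (objective: alternative decomposition, no sort and no index bookkeeping).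

-- ===== PORT A =====
-- the '#'-note conversion both Pythons share verbatim (six sequential 2-char replaces)
def pvConvert (s : List Char) : List Char :=
  PySem.Chars.replace (PySem.Chars.replace (PySem.Chars.replace (PySem.Chars.replace
    (PySem.Chars.replace (PySem.Chars.replace s "C#".toList "c".toList)
      "D#".toList "d".toList) "F#".toList "f".toList) "G#".toList "g".toList)
    "A#".toList "a".toList) "B#".toList "b".toList

-- A's loop body: parse one info string and return (play_time, title) when the converted wanted
-- melody mc occurs in the played melody; none both when the test fails and where Python raises
def pvScan (mc : List Char) (info : String) : Option (Int × String) :=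
  match PySem.Str.split? info "," with
  | some [start, stop, title, melody] =>
    match PySem.Str.split? start ":", PySem.Str.split? stop ":" with
    | some [a, b], some [c, d] =>
      match PySem.Int.ofStr? a, PySem.Int.ofStr? b, PySem.Int.ofStr? c, PySem.Int.ofStr? d with
      | some sh, some sm, some eh, some em =>
        let playTime : Int := (eh * 60 + em) - (sh * 60 + sm)
        let mel : List Char := pvConvert melody.toList
        match PySem.Int.floordiv? playTime (mel.length : Int) with
        | some q =>
          let played := PySem.List.slice (PySem.List.pyRepeat mel (q + 1)) none (some playTime)
          if PySem.Chars.isIn mc played then some (playTime, title) else none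
        | none => none
      | _, _, _, _ => none
    | _, _ => none
  | _ => none

def solution (m : String) (musicinfos : List String) : String :=
  let mc := pvConvert m.toList
  let answer : List (Int × Int × String) :=
    (PySem.List.enumerate musicinfos).foldl
      (fun acc p =>
        match pvScan mc p.2 with
        | some r => acc ++ [(r.1, p.1, r.2)]
        | none => acc) []
  if answer.isEmpty then "(None)"
  else
    match PySem.List.sorted2 answer (fun x => -x.1) (fun x => x.2.1) with
    | x :: _ => x.2.2
    | [] => "(None)"

-- ===== PORT B =====
-- minutes("HH:MM") = HH*60 + MM; none where Python's unpack/int() raises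
def pvMinutes? (clock : String) : Option Int :=
  match PySem.Str.split? clock ":" with
  | some [h, mn] =>
    match PySem.Int.ofStr? h, PySem.Int.ofStr? mn with
    | some a, some b => some (a * 60 + b)
    | _, _ => none
  | _ => none

-- ''.join(tune[i % len(tune)] for i in range(t)) — the played melody built note by note
-- (the ' ' default of pyGetD is never read when tune ≠ [], which Pre_ guarantees)
def pvPlayed (tune : List Char) (t : Int) : List Char :=
  (PySem.List.pyRange 0 t 1).map
    (fun i => PySem.List.pyGetD tune (PySem.Int.mod i (tune.length : Int)) ' ')

-- B's loop body
def pvCheck (mc : List Char) (info : String) : Option (Int × String) :=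
  match PySem.Str.split? info "," with
  | some [start, stop, title, tune] =>
    match pvMinutes? start, pvMinutes? stop with
    | some s, some e =>
      let t : Int := e - s
      if PySem.Chars.isIn mc (pvPlayed (pvConvert tune.toList) t) then some (t, title) else none
    | _, _ => none
  | _ => none

def solution_alt (m : String) (musicinfos : List String) : String :=
  let mc := pvConvert m.toList
  let best :=
    musicinfos.foldl
      (fun b info =>
        match pvCheck mc info with
        | some r =>
          match b with
          | none => some r
          | some c => if c.1 < r.1 then some r else some c
        | none => b) (none : Option (Int × String))
  match best with
  | some c => c.2
  | none => "(None)"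

-- ===== PRECONDITION & SPEC =====
-- Pre_ excludes exactly the inputs where Python A raises: an info that does not split on ','
-- into 4 fields, a time field that does not split on ':' into 2 int()-parseable parts
-- (ValueError), or an empty converted melody (ZeroDivisionError).
def pvOkTime (t : String) : Bool :=
  match PySem.Str.split? t ":" with
  | some [a, b] => (PySem.Int.ofStr? a).isSome && (PySem.Int.ofStr? b).isSome
  | _ => false

def pvOkInfo (info : String) : Bool :=
  match PySem.Str.split? info "," with
  | some [start, stop, _, melody] =>
    pvOkTime start && pvOkTime stop && !(pvConvert melody.toList).isEmpty
  | _ => false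

def Pre_solution (m : String) (musicinfos : List String) : Prop :=
  musicinfos.all pvOkInfo = true

instance (m : String) (musicinfos : List String) : Decidable (Pre_solution m musicinfos) := by
  unfold Pre_solution; infer_instance

def pvWitness_solution : String × List String := ("ABC", ["12:00,12:03,T,ABC"])

def Spec_solution (m : String) (musicinfos : List String) (out : String) : Prop := out = solution_alt m musicinfos
instance (m : String) (musicinfos : List String) (out : String) : Decidable (Spec_solution m musicinfos out) := by unfold Spec_solution; infer_instance

-- ===== CLAIM (what is proved, stated in full; the proofs are below) =====
def Claim_equal_solution : Prop := ∀ (m : String) (musicinfos : List String), Dom_solution m musicinfos → Pre_solution m musicinfos → Spec_solution m musicinfos (solution m musicinfos)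

-- ===== LEMMAS AND PROOFS =====

-- ---- part 1: the two played-melody constructions agree on a non-empty tune ----

theorem pvFlatRep (mel : List Char) (k i : Nat) (h : i < k * mel.length) :
    ((List.replicate k mel).flatten).getD i ' ' = mel.getD (i % mel.length) ' ' := by
  induction k generalizing i with
  | zero => simp at h
  | succ k ih =>
    rw [List.replicate_succ, List.flatten_cons]
    by_cases hi : i < mel.length
    · rw [List.getD_append _ _ _ _ hi, Nat.mod_eq_of_lt hi]
    · have hi' : mel.length ≤ i := Nat.le_of_not_lt hi
      rw [Nat.succ_mul] at h
      rw [List.getD_append_right _ _ _ _ hi', Nat.mod_eq_sub_mod hi']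
      exact ih (i - mel.length) (by omega)

theorem pvPlayed_eq (mel : List Char) (t : Int) (hm : mel ≠ []) :
    PySem.List.slice (PySem.List.pyRepeat mel (PySem.Int.floordiv t (mel.length : Int) + 1))
      none (some t) = pvPlayed mel t := by
  have hL : 0 < mel.length := List.length_pos_iff.mpr hm
  by_cases ht : 0 ≤ t
  · obtain ⟨n, rfl⟩ := Int.eq_ofNat_of_zero_le ht
    have hkey : n ≤ (n / mel.length + 1) * mel.length := by
      have h1 := Nat.div_add_mod n mel.length
      have h2 := Nat.mod_lt n hL
      calc n = mel.length * (n / mel.length) + n % mel.length := h1.symm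
        _ ≤ mel.length * (n / mel.length) + mel.length := by omega
        _ = (n / mel.length + 1) * mel.length := by ring
    rw [PySem.Int.floordiv_natCast]
    unfold PySem.List.pyRepeat
    rw [show ((n / mel.length : Nat) : Int) + 1 = ((n / mel.length + 1 : Nat) : Int) by push_cast; ring,
      Int.toNat_natCast, PySem.List.slice_to_natCast]
    unfold pvPlayed
    rw [PySem.List.pyRange_zero_natCast, List.map_map]
    apply List.ext_getElem
    · simp only [List.length_take, List.length_flatten, List.map_replicate, List.sum_replicate,
        smul_eq_mul, List.length_map, List.length_range]
      omega
    · intro i h1 h2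
      have hflatlen : ((List.replicate (n / mel.length + 1) mel).flatten).length
          = (n / mel.length + 1) * mel.length := by
        simp [List.length_flatten, List.sum_replicate]
      have hi : i < n := by simpa using h2
      have hif : i < ((List.replicate (n / mel.length + 1) mel).flatten).length := by omega
      rw [List.getElem_take, List.getElem_map, List.getElem_range,
        ← List.getD_eq_getElem _ ' ' hif, pvFlatRep mel _ i (by omega)]
      simp only [Function.comp_apply, PySem.Int.mod_natCast, PySem.List.pyGetD_natCast]
  · have ht' : t < 0 := by omega
    have hq : PySem.Int.floordiv t (mel.length : Int) + 1 ≤ 0 := by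
      have := (PySem.Int.floordiv_lt_iff_lt_mul (a := t) (b := (mel.length : Int)) (q := 0)
        (by exact_mod_cast hL)).mpr (by simpa using ht')
      omega
    have hr : ¬ (0 : Int) < t := by omega
    unfold PySem.List.pyRepeat pvPlayed
    rw [Int.toNat_of_nonpos hq]
    simp [PySem.List.slice, PySem.List.pyRange, hr]

-- ---- part 2: the two loop bodies agree on an info that Pre_ admits ----

theorem pvScan_eq (mc : List Char) (info : String) (h : pvOkInfo info = true) :
    pvScan mc info = pvCheck mc info := by
  unfold pvOkInfo at h
  split at h
  case _ start stop title melody hs =>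
    unfold pvOkTime at h
    simp only [Bool.and_eq_true] at h
    obtain ⟨⟨hT1, hT2⟩, hmel⟩ := h
    split at hT1
    case _ a b h1 =>
      split at hT2
      case _ c d h2 =>
        simp only [Bool.and_eq_true, Option.isSome_iff_exists] at hT1 hT2
        obtain ⟨⟨sh, ha⟩, sm, hb⟩ := hT1
        obtain ⟨⟨eh, hc⟩, em, hd⟩ := hT2
        have hne : (pvConvert melody.toList).length ≠ 0 := by
          simpa [List.isEmpty_iff, List.length_eq_zero_iff] using hmel
        have hfd : PySem.Int.floordiv? ((eh * 60 + em) - (sh * 60 + sm))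
            ((pvConvert melody.toList).length : Int)
            = some (PySem.Int.floordiv ((eh * 60 + em) - (sh * 60 + sm))
                ((pvConvert melody.toList).length : Int)) := by
          simp [PySem.Int.floordiv?, PySem.Int.floordiv, hne]
        simp only [pvScan, pvCheck, pvMinutes?, hs, h1, h2, ha, hb, hc, hd, hfd]
        rw [pvPlayed_eq _ _ (by simpa [List.isEmpty_iff] using hmel)]
      case _ => simp at hT2
    case _ => simp at hT1
  case _ => simp at h

-- ---- part 3: fold-and-sort versus running maximum (selection) ----

-- the comparison sorted2 uses for key (-play_time, idx)
def pvBefore (x y : Int × Int × String) : Bool :=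
  decide (-x.1 < -y.1) || (!decide (-y.1 < -x.1) && decide (x.2.1 < y.2.1))

-- head evolution of one insertBy step
def pvHstep (x : Option (Int × Int × String)) (y : Int × Int × String) :
    Option (Int × Int × String) :=
  some (match x with | none => y | some z => if pvBefore y z then y else z)

-- B's accumulator step on (play_time, title) pairs
def pvPstep (b : Option (Int × String)) (r : Int × String) : Option (Int × String) :=
  match b with
  | none => some r
  | some c => if c.1 < r.1 then some r else some c

def pvProj (x : Int × Int × String) : Int × String := (x.1, x.2.2)

theorem pvHead_insertBy (x : Int × Int × String) (ys : List (Int × Int × String)) :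
    (PySem.List.insertBy pvBefore x ys).head? = pvHstep ys.head? x := by
  cases ys with
  | nil => rfl
  | cons y t =>
    simp only [PySem.List.insertBy, pvHstep, List.head?]
    by_cases h : pvBefore x y = true <;> simp [h]

theorem pvHead_foldl_insertBy (l : List (Int × Int × String))
    (acc : List (Int × Int × String)) :
    (l.foldl (fun a x => PySem.List.insertBy pvBefore x a) acc).head? =
      l.foldl pvHstep acc.head? := by
  induction l generalizing acc with
  | nil => rfl
  | cons x t ih => simp only [List.foldl]; rw [ih, pvHead_insertBy]

theorem pvSorted2_head (l : List (Int × Int × String)) :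
    (PySem.List.sorted2 l (fun x => -x.1) (fun x => x.2.1)).head? =
      l.foldl pvHstep none := by
  have h : PySem.List.sorted2 l (fun x => -x.1) (fun x => x.2.1) =
      l.foldl (fun a x => PySem.List.insertBy pvBefore x a) [] := rfl
  rw [h, pvHead_foldl_insertBy]; rfl

theorem pvFoldl_hstep_some (l : List (Int × Int × String)) (x : Int × Int × String) :
    ∃ y, l.foldl pvHstep (some x) = some y := by
  induction l generalizing x with
  | nil => exact ⟨x, rfl⟩
  | cons z t ih => simpa [List.foldl, pvHstep] using ih _

-- the core: on an idx-strictly-increasing list the lexicographic first-min fold is the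
-- plain running strict max on play_time, projected to (play_time, title)
theorem pvCore (l : List (Int × Int × String)) (b : Int × Int × String)
    (hb : ∀ x ∈ l, b.2.1 < x.2.1)
    (hp : l.Pairwise (fun a c => a.2.1 < c.2.1)) :
    (l.foldl pvHstep (some b)).map pvProj = (l.map pvProj).foldl pvPstep (some (pvProj b)) := by
  induction l generalizing b with
  | nil => rfl
  | cons x t ih =>
    have hbx : b.2.1 < x.2.1 := hb x (List.mem_cons_self ..)
    have hbefore : pvBefore x b = decide (b.1 < x.1) := by
      have h1 : ¬ (x.2.1 < b.2.1) := by omega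
      have h2 : ((-x.1 : Int) < -b.1) = (b.1 < x.1) := by
        apply propext; omega
      simp [pvBefore, h1, h2]
    rcases List.pairwise_cons.mp hp with ⟨hxt, hpt⟩
    simp only [List.foldl, List.map, pvHstep, hbefore, pvPstep, pvProj]
    by_cases hlt : b.1 < x.1
    · simp only [hlt, decide_true, if_true]
      exact ih x (fun z hz => hxt z hz) hpt
    · simp only [hlt, decide_false, if_false]
      exact ih b (fun z hz => hb z (List.mem_cons_of_mem _ hz)) hpt

theorem pvCore' (l : List (Int × Int × String))
    (hp : l.Pairwise (fun a c => a.2.1 < c.2.1)) :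
    (l.foldl pvHstep none).map pvProj = (l.map pvProj).foldl pvPstep none := by
  cases l with
  | nil => rfl
  | cons x t =>
    rcases List.pairwise_cons.mp hp with ⟨hxt, hpt⟩
    simpa [List.foldl, pvHstep, pvPstep] using pvCore t x hxt hpt

-- A's answer list as a filterMap over enumerate
theorem pvAnswer_eq (f : String → Option (Int × String)) (l : List (Int × String))
    (acc : List (Int × Int × String)) :
    l.foldl (fun a p => match f p.2 with | some r => a ++ [(r.1, p.1, r.2)] | none => a) acc =
      acc ++ l.filterMap (fun p => (f p.2).map (fun r => (r.1, p.1, r.2))) := by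
  induction l generalizing acc with
  | nil => simp
  | cons p t ih =>
    cases hfp : f p.2 with
    | none => simp [List.foldl, hfp, ih]
    | some r => simp [List.foldl, hfp, ih]

-- B's fold as a fold over the filterMap of the same per-item function
theorem pvBest_eq (f : String → Option (Int × String)) (l : List String) :
    l.foldl
      (fun b info =>
        match f info with
        | some r => match b with
          | none => some r
          | some c => if c.1 < r.1 then some r else some c
        | none => b) none =
      (l.filterMap f).foldl pvPstep none := by
  rw [List.foldl_filterMap]
  apply PySem.List.foldl_congr_mem
  intro acc x _
  cases f x <;> rfl

theorem pvMain (f : String → Option (Int × String)) (l : List String) :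
    (if ((PySem.List.enumerate l).foldl
        (fun acc p => match f p.2 with | some r => acc ++ [(r.1, p.1, r.2)] | none => acc)
        ([] : List (Int × Int × String))).isEmpty then "(None)"
     else
       match PySem.List.sorted2
           ((PySem.List.enumerate l).foldl
             (fun acc p => match f p.2 with | some r => acc ++ [(r.1, p.1, r.2)] | none => acc)
             ([] : List (Int × Int × String)))
           (fun x => -x.1) (fun x => x.2.1) with
       | x :: _ => x.2.2
       | [] => "(None)") =
    (match l.foldl
        (fun b info =>
          match f info with
          | some r => match b with
            | none => some r
            | some c => if c.1 < r.1 then some r else some c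
          | none => b) (none : Option (Int × String)) with
     | some c => c.2
     | none => "(None)") := by
  have hans := pvAnswer_eq f (PySem.List.enumerate l) []
  set g : Int × String → Option (Int × Int × String) :=
    fun p => (f p.2).map (fun r => (r.1, p.1, r.2)) with hg
  set answer := (PySem.List.enumerate l).filterMap g with hansdef
  -- the answer list is idx-strictly increasing
  have hpair : answer.Pairwise (fun a c => a.2.1 < c.2.1) := by
    rw [hansdef, List.pairwise_filterMap]
    refine (PySem.List.pairwise_lt_enumerate l 0).imp_of_mem ?_
    intro p q hp hq hlt x hx y hy
    simp only [hg, Option.map_eq_some_iff] at hx hy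
    rcases hx with ⟨r1, _, rfl⟩
    rcases hy with ⟨r2, _, rfl⟩
    exact hlt
  -- projecting answer gives the candidate pair list
  have hproj : answer.map pvProj = l.filterMap f := by
    rw [hansdef, List.map_filterMap]
    have : (fun p : Int × String => (g p).map pvProj) = fun p => f p.2 := by
      funext p
      cases hfp : f p.2 <;> simp [hg, hfp, pvProj]
    rw [this]
    have hsnd : (PySem.List.enumerate l).map Prod.snd = l := PySem.List.map_snd_enumerate l 0
    calc (PySem.List.enumerate l).filterMap (fun p => f p.2)
        = ((PySem.List.enumerate l).map Prod.snd).filterMap f := by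
          rw [List.filterMap_map]; rfl
      _ = l.filterMap f := by rw [hsnd]
  rw [pvBest_eq f l, hans, List.nil_append, ← hproj, ← pvCore' answer hpair]
  cases hcase : answer with
  | nil => simp
  | cons x t =>
    simp only [List.isEmpty_cons, Bool.false_eq_true, if_false]
    rcases pvFoldl_hstep_some t x with ⟨y, hy⟩
    have hfold : (x :: t).foldl pvHstep none = some y := by
      simpa [List.foldl, pvHstep] using hy
    have hhead := pvSorted2_head (x :: t)
    rw [hfold] at hhead
    rw [hfold]
    rcases hsorted : PySem.List.sorted2 (x :: t) (fun x => -x.1) (fun x => x.2.1) with _ | ⟨z, tz⟩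
    · rw [hsorted] at hhead; simp at hhead
    · rw [hsorted] at hhead
      simp only [List.head?] at hhead
      cases hhead
      rfl

-- ===== VERDICT (by name: the statement is the Claim_ definition above) =====
theorem solution_spec : Claim_equal_solution := by
  intro m musicinfos _ hpre
  show solution m musicinfos = solution_alt m musicinfos
  have hfold :
      musicinfos.foldl
        (fun b info =>
          match pvCheck (pvConvert m.toList) info with
          | some r =>
            match b with
            | none => some r
            | some c => if c.1 < r.1 then some r else some c
          | none => b) (none : Option (Int × String)) =
      musicinfos.foldl
        (fun b info =>
          match pvScan (pvConvert m.toList) info with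
          | some r =>
            match b with
            | none => some r
            | some c => if c.1 < r.1 then some r else some c
          | none => b) (none : Option (Int × String)) := by
    apply PySem.List.foldl_congr_mem
    intro acc info hinfo
    rw [pvScan_eq (pvConvert m.toList) info (by
      exact List.all_eq_true.mp hpre info hinfo)]
  show (if ((PySem.List.enumerate musicinfos).foldl
        (fun acc p =>
          match pvScan (pvConvert m.toList) p.2 with
          | some r => acc ++ [(r.1, p.1, r.2)]
          | none => acc) ([] : List (Int × Int × String))).isEmpty then "(None)"
     else
       match PySem.List.sorted2
           ((PySem.List.enumerate musicinfos).foldl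
             (fun acc p =>
               match pvScan (pvConvert m.toList) p.2 with
               | some r => acc ++ [(r.1, p.1, r.2)]
               | none => acc) ([] : List (Int × Int × String)))
           (fun x => -x.1) (fun x => x.2.1) with
       | x :: _ => x.2.2
       | [] => "(None)") =
    (match musicinfos.foldl
        (fun b info =>
          match pvCheck (pvConvert m.toList) info with
          | some r =>
            match b with
            | none => some r
            | some c => if c.1 < r.1 then some r else some c
          | none => b) (none : Option (Int × String)) with
     | some c => c.2
     | none => "(None)")
  rw [hfold]
  exact pvMain (pvScan (pvConvert m.toList)) musicinfos
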